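-- pv_equiv track=rewrite | github.com/ASSERT-KTH/Mokav | experiments/pynguin/c4b/return-lst/generated_tests/src_2095/1/src_2095.py | func
-- ===== SOURCE A (Python) =====
-- def func(*args):
-- 	ret_values = []
--
-- 	import re
-- 	char = str(args[0])
-- 	cmd = ['H', 'Q', '9']
-- 	time = 0
-- 	for c in cmd:
-- 	    if (c in char):
-- 	        time += 1
-- 	if (time > 0):
-- 	    ret_values.append('YES')
-- 	else:
-- 	    ret_values.append('NO')
--
-- 	return ret_values
-- ===== SOURCE B (Python) =====
-- def func(*args):
--     char = str(args[0])
--     needles = {'H', 'Q', '9'}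
--     for ch in char:
--         if ch in needles:
--             return ['YES']
--     return ['NO']
-- ===== Notes on version B (the rewrite author's own statement) =====
-- stated objective: idiomatic
-- what changed: Reverses the traversal: instead of three substring scans counting how many needles occur, B makes one pass over the characters of the string with a needle set, returning a yes answer as soon as a character is a needle, else a no answer.
import Mathlib
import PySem

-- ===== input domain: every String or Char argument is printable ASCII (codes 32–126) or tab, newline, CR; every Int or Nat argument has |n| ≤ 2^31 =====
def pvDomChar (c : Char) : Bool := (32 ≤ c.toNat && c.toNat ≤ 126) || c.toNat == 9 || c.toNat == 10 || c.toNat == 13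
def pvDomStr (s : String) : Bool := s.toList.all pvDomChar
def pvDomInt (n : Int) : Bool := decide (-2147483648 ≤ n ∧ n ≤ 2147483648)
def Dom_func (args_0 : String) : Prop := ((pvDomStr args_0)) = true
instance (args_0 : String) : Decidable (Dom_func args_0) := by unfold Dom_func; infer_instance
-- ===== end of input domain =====

-- B makes one pass over the string's characters with a needle set, instead of A's three substring scans.

-- ===== PORT A =====
def func (args_0 : String) : List String :=
  let char := args_0
  let cmd : List String := ["H", "Q", "9"]
  let time : Int := cmd.foldl (fun t c => if PySem.Str.isIn c char then t + 1 else t) 0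
  if time > 0 then ["YES"] else ["NO"]

-- ===== PORT B =====
def funcAltGo : List Char → List String
  | [] => ["NO"]
  | ch :: rest => if ch ∈ ['H', 'Q', '9'] then ["YES"] else funcAltGo rest

def func_alt (args_0 : String) : List String :=
  funcAltGo args_0.toList

-- ===== PRECONDITION & SPEC =====
def Spec_func (args_0 : String) (out : List String) : Prop := out = func_alt args_0
instance (args_0 : String) (out : List String) : Decidable (Spec_func args_0 out) := by unfold Spec_func; infer_instance

-- ===== CLAIM (what is proved, stated in full; the proofs are below) =====
def Claim_equal_func : Prop := ∀ (args_0 : String), Dom_func args_0 → Spec_func args_0 (func args_0)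

-- ===== LEMMAS AND PROOFS =====

lemma funcAltGo_eq (l : List Char) :
    funcAltGo l = if 'H' ∈ l ∨ 'Q' ∈ l ∨ '9' ∈ l then ["YES"] else ["NO"] := by
  induction l with
  | nil => simp [funcAltGo]
  | cons c rest ih =>
    simp only [funcAltGo, ih, List.mem_cons]
    by_cases h1 : c = 'H' <;> by_cases h2 : c = 'Q' <;> by_cases h3 : c = '9' <;>
      simp [h1, h2, h3, Ne.symm, eq_comm]

lemma singleton_isIn (c : Char) (s : String) :
    PySem.Str.isIn (String.ofList [c]) s = true ↔ c ∈ s.toList := by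
  rw [PySem.Str.isIn_iff_infix]
  constructor
  · intro ⟨p, q, h⟩
    have : c ∈ s.toList := by rw [← h]; simp
    exact this
  · intro h
    obtain ⟨p, q, h⟩ := List.append_of_mem h
    exact ⟨p, q, by simp [h]⟩

-- ===== VERDICT (by name: the statement is the Claim_ definition above) =====
theorem func_spec : Claim_equal_func := by
  intro s _
  show func s = func_alt s
  unfold func func_alt
  rw [funcAltGo_eq]
  simp only [List.foldl]
  have eH : "H" = String.ofList ['H'] := rfl
  have eQ : "Q" = String.ofList ['Q'] := rfl
  have e9 : "9" = String.ofList ['9'] := rfl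
  rw [eH, eQ, e9]
  have hH := singleton_isIn 'H' s
  have hQ := singleton_isIn 'Q' s
  have h9 := singleton_isIn '9' s
  by_cases b1 : 'H' ∈ s.toList <;> by_cases b2 : 'Q' ∈ s.toList <;> by_cases b3 : '9' ∈ s.toList <;>
    simp_all
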